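-- pv_equiv track=rewrite | github.com/samanthvarma/sokoban | scene_2/scene_22.py | generate_all_possible_box_states
-- ===== SOURCE A (Python) =====
-- def generate_all_possible_box_states(valid_cells, num_boxes):
--     """
--     Generate all valid box configurations (without overlaps).
--     This is used to pre-compute possible box states.
--     Warning: This grows factorially with the number of boxes and cells.
--     """
--     # Start with no boxes placed
--     def backtrack(placed_boxes, remaining_cells, box_idx):
--         if box_idx == num_boxes:
--             return [placed_boxes[:]]  # Found a valid configuration
--
--         results = []
--         for i, cell in enumerate(remaining_cells):
--             # Place this box at this cell
--             placed_boxes.append(cell)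
--             # Recursively place remaining boxes in remaining cells
--             results.extend(backtrack(placed_boxes, remaining_cells[:i] + remaining_cells[i+1:], box_idx + 1))
--             placed_boxes.pop()
--
--         return results
--
--     return backtrack([], valid_cells, 0)
-- ===== SOURCE B (Python) =====
-- def generate_all_possible_box_states(valid_cells, num_boxes):
--     """Iterative level-by-level expansion: each round extends every partial
--     placement by one more box in every still-free cell (no recursion)."""
--     states = [([], valid_cells)]
--     for _ in range(num_boxes):
--         if not states:
--             break
--         states = [(placed + [cell], rem[:i] + rem[i + 1:])
--                   for placed, rem in states
--                   for i, cell in enumerate(rem)]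
--     return [placed for placed, _ in states]
-- ===== Notes on version B (the rewrite author's own statement) =====
-- stated objective: alternative
-- what changed: Replaces the mutating DFS backtracking recursion with an iterative breadth-wise loop that expands a worklist of (placement, free-cells) states one box level per round via a comprehension.
-- outside the precondition, e.g. on generate_all_possible_box_states([], -1): A returns [], B returns [[]]; on generate_all_possible_box_states([(0, 0)], -2): A returns [], B returns [[]]
import Mathlib
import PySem

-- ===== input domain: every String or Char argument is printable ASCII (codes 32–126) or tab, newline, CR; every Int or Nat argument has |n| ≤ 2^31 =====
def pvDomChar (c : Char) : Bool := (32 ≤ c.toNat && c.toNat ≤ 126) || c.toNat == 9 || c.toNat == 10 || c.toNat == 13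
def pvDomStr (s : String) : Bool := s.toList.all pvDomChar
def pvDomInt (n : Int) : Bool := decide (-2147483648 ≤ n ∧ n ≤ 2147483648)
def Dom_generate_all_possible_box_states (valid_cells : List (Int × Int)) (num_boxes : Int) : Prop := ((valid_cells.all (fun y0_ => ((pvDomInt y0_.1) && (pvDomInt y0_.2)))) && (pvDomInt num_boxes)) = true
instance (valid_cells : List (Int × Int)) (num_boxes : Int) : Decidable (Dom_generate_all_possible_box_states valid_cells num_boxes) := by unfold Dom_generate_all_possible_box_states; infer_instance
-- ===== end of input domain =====

-- B replaces the mutating DFS backtracking recursion with an iterative level-by-level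
-- worklist expansion (alternative decomposition; same output, same asymptotic cost).


-- ===== PORT A =====
-- membership bound for enumerate, used by the port's termination proof
theorem pv_mem_enumerate_bound {α : Type} {i : Int} {c : α} :
    ∀ (xs : List α) (s : Int), (i, c) ∈ PySem.List.enumerate xs s → s ≤ i ∧ i < s + xs.length
  | [], s, h => by simp [PySem.List.enumerate_nil] at h
  | x :: xs, s, h => by
    rw [PySem.List.enumerate_cons] at h
    rcases List.mem_cons.mp h with h | h
    · cases h; simp only [List.length_cons]; push_cast; omega
    · have := pv_mem_enumerate_bound xs (s + 1) h
      simp only [List.length_cons]; push_cast at this ⊢; omega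

-- length of remaining_cells[:i] + remaining_cells[i+1:], for the termination proof
theorem pv_remove_len {α : Type} (xs : List α) (i : Int) (h0 : 0 ≤ i) (h1 : i < (xs.length : Int)) :
    (PySem.List.slice xs none (some i) ++ PySem.List.slice xs (some (i + 1)) none).length
      < xs.length := by
  rw [PySem.List.slice_to xs h0, PySem.List.slice_from xs (by omega)]
  simp only [List.length_append, List.length_take, List.length_drop]
  omega

-- backtrack(placed_boxes, remaining_cells, box_idx); results.extend in the loop = flatMap
def pvBacktrack (num_boxes : Int) (placed : List (Int × Int)) (rem : List (Int × Int))
    (box_idx : Int) : List (List (Int × Int)) :=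
  if box_idx = num_boxes then [placed]
  else (PySem.List.enumerate rem).attach.flatMap (fun ic =>
    pvBacktrack num_boxes (placed ++ [ic.1.2])
      (PySem.List.slice rem none (some ic.1.1) ++ PySem.List.slice rem (some (ic.1.1 + 1)) none)
      (box_idx + 1))
termination_by rem.length
decreasing_by
  obtain ⟨⟨i, c⟩, hm⟩ := ic
  have hb := pv_mem_enumerate_bound rem 0 hm
  exact pv_remove_len rem i (by omega) (by omega)

def generate_all_possible_box_states (valid_cells : List (Int × Int)) (num_boxes : Int) :
    List (List (Int × Int)) :=
  pvBacktrack num_boxes [] valid_cells 0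

-- ===== PORT B =====
-- one round of the worklist loop body (the comprehension in Source B)
def pvExpand (states : List (List (Int × Int) × List (Int × Int))) :
    List (List (Int × Int) × List (Int × Int)) :=
  states.flatMap (fun pr =>
    (PySem.List.enumerate pr.2).map (fun ic =>
      (pr.1 ++ [ic.2],
       PySem.List.slice pr.2 none (some ic.1) ++ PySem.List.slice pr.2 (some (ic.1 + 1)) none)))

-- 'for _ in range(num_boxes): if not states: break; states = <comprehension>'
-- counted loop with early exit, ported as recursion on the remaining iteration count
def pvLoopB : Nat → List (List (Int × Int) × List (Int × Int)) →
    List (List (Int × Int) × List (Int × Int))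
  | 0, states => states
  | k + 1, states => if states.isEmpty then states else pvLoopB k (pvExpand states)

def generate_all_possible_box_states_alt (valid_cells : List (Int × Int)) (num_boxes : Int) :
    List (List (Int × Int)) :=
  (pvLoopB num_boxes.toNat [([], valid_cells)]).map Prod.fst

-- ===== PRECONDITION & SPEC =====
-- Pre_ excludes negative num_boxes, where A's [] (the recursion never bottoms out) and
-- B's [[]] (zero expansion rounds) are both defensible answers to a nonsensical request.
def Pre_generate_all_possible_box_states (valid_cells : List (Int × Int)) (num_boxes : Int) : Prop :=
  0 ≤ num_boxes
instance (valid_cells : List (Int × Int)) (num_boxes : Int) : Decidable (Pre_generate_all_possible_box_states valid_cells num_boxes) := by unfold Pre_generate_all_possible_box_states; infer_instance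
def pvWitness_generate_all_possible_box_states : (List (Int × Int)) × Int := ([(0, 0), (1, 2)], 1)

def Spec_generate_all_possible_box_states (valid_cells : List (Int × Int)) (num_boxes : Int) (out : List (List (Int × Int))) : Prop := out = generate_all_possible_box_states_alt valid_cells num_boxes
instance (valid_cells : List (Int × Int)) (num_boxes : Int) (out : List (List (Int × Int))) : Decidable (Spec_generate_all_possible_box_states valid_cells num_boxes out) := by unfold Spec_generate_all_possible_box_states; infer_instance

-- ===== CLAIM (what is proved, stated in full; the proofs are below) =====
def Claim_equal_generate_all_possible_box_states : Prop := ∀ (valid_cells : List (Int × Int)) (num_boxes : Int), Dom_generate_all_possible_box_states valid_cells num_boxes → Pre_generate_all_possible_box_states valid_cells num_boxes → Spec_generate_all_possible_box_states valid_cells num_boxes (generate_all_possible_box_states valid_cells num_boxes)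

-- ===== LEMMAS AND PROOFS =====

-- common normal form: the DFS tree with k levels remaining
def pvF : Nat → List (Int × Int) → List (Int × Int) → List (List (Int × Int))
  | 0, placed, _ => [placed]
  | k + 1, placed, rem => (PySem.List.enumerate rem).flatMap (fun ic =>
      pvF k (placed ++ [ic.2])
        (PySem.List.slice rem none (some ic.1) ++ PySem.List.slice rem (some (ic.1 + 1)) none))

theorem pvBacktrack_eq_pvF : ∀ (k : Nat) (placed rem : List (Int × Int)) (n b : Int),
    n = b + (k : Int) → pvBacktrack n placed rem b = pvF k placed rem := by
  intro k
  induction k with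
  | zero =>
    intro placed rem n b h
    rw [pvBacktrack.eq_def, if_pos (by omega)]
    rfl
  | succ k ih =>
    intro placed rem n b h
    rw [pvBacktrack.eq_def, if_neg (by omega)]
    show (PySem.List.enumerate rem).attach.flatMap _ = pvF (k + 1) placed rem
    rw [pvF]
    simp only [List.flatMap_subtype, List.unattach_attach]
    exact List.flatMap_congr (fun ic _ => ih _ _ n (b + 1) (by push_cast at h ⊢; omega))

theorem pvLoopB_eq_pvF (k : Nat) :
    ∀ (S : List (List (Int × Int) × List (Int × Int))),
    (pvLoopB k S).map Prod.fst = S.flatMap (fun pr => pvF k pr.1 pr.2) := by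
  induction k with
  | zero =>
    intro S
    induction S with
    | nil => rfl
    | cons x xs ih => simp [pvLoopB, pvF, List.map_eq_flatMap] at ih ⊢
  | succ k ih =>
    intro S
    rw [pvLoopB]
    rcases S with _ | ⟨x, xs⟩
    · simp
    · rw [if_neg (by simp), ih, pvExpand, List.flatMap_assoc]
      refine List.flatMap_congr (fun pr _ => ?_)
      rw [List.flatMap_map]
      simp only [pvF]

-- ===== VERDICT (by name: the statement is the Claim_ definition above) =====
theorem generate_all_possible_box_states_spec : Claim_equal_generate_all_possible_box_states := by
  intro valid_cells num_boxes _ hpre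
  have h0 : 0 ≤ num_boxes := hpre
  unfold Spec_generate_all_possible_box_states generate_all_possible_box_states
    generate_all_possible_box_states_alt
  rw [pvLoopB_eq_pvF, pvBacktrack_eq_pvF num_boxes.toNat [] valid_cells num_boxes 0 (by omega)]
  simp
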